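-- pv_equiv track=rewrite | github.com/lukaschristensson/MCUSim | MCUSim.py | bitWiseAND
-- ===== SOURCE A (Python) =====
-- def bitWiseAND(a, b):
--     res = ''
--     for i in a:
--         for j in b:
--             if i == '1' and j == '1':
--                 res += '1'
--             else:
--                 res += '0'
--     return res, '1' not in res
-- ===== SOURCE B (Python) =====
-- def bitWiseAND(a, b):
--     row_one = ''.join('1' if c == '1' else '0' for c in b)
--     row_zero = '0' * len(b)
--     res = ''.join(row_one if c == '1' else row_zero for c in a)
--     return res, not ('1' in a and '1' in b)
-- ===== Notes on version B (the rewrite author's own statement) =====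
-- stated objective: simpler
-- what changed: B precomputes the two possible row strings once and joins one selected row per character of a, and computes the flag directly from membership of '1' in a and in b instead of scanning the built result, replacing A's nested per-pair loop with quadratic string appends.
import Mathlib
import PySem

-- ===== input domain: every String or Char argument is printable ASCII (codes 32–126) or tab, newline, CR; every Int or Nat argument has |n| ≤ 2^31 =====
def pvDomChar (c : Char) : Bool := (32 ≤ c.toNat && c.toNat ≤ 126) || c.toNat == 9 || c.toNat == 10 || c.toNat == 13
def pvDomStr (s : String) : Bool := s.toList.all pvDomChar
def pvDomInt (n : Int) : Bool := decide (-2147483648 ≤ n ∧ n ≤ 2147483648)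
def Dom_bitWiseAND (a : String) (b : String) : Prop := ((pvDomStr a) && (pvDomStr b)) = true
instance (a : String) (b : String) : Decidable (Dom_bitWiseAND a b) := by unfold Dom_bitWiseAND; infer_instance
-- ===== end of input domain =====

-- B precomputes the two possible row strings once and selects one per character of a,
-- and derives the flag from membership of '1' in a and b instead of scanning the result (objective: simpler).

-- ===== PORT A =====
-- literal transliteration: nested loops appending one char per (i, j) pair, then '1' not in res
def bitWiseAND (a : String) (b : String) : String × Bool :=
  let res : List Char :=
    a.toList.foldl (fun res i =>
      b.toList.foldl (fun res j =>
        res ++ [if i = '1' ∧ j = '1' then '1' else '0']) res) []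
  (String.ofList res, !(res.contains '1'))

-- ===== PORT B =====
def bitWiseAND_alt (a : String) (b : String) : String × Bool :=
  let rowOne : List Char := b.toList.map (fun c => if c = '1' then '1' else '0')
  let rowZero : List Char := List.replicate b.toList.length '0'
  let res : List Char := (a.toList.map (fun c => if c = '1' then rowOne else rowZero)).flatten
  (String.ofList res, !(a.toList.contains '1' && b.toList.contains '1'))

-- ===== PRECONDITION & SPEC =====
def Spec_bitWiseAND (a : String) (b : String) (out : String × Bool) : Prop := out = bitWiseAND_alt a b
instance (a : String) (b : String) (out : String × Bool) : Decidable (Spec_bitWiseAND a b out) := by unfold Spec_bitWiseAND; infer_instance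

-- ===== CLAIM (what is proved, stated in full; the proofs are below) =====
def Claim_equal_bitWiseAND : Prop := ∀ (a : String) (b : String), Dom_bitWiseAND a b → Spec_bitWiseAND a b (bitWiseAND a b)

-- ===== LEMMAS AND PROOFS =====

-- the inner loop appends one mapped char per element of l
theorem pv_inner_foldl (l : List Char) (f : Char → Char) (acc : List Char) :
    l.foldl (fun r j => r ++ [f j]) acc = acc ++ l.map f := by
  induction l generalizing acc with
  | nil => simp
  | cons x xs ih => simp [List.foldl_cons, ih]

-- the outer loop appends one row per element of l
theorem pv_outer_foldl (l : List Char) (g : Char → List Char) (acc : List Char) :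
    l.foldl (fun r i => r ++ g i) acc = acc ++ (l.map g).flatten := by
  induction l generalizing acc with
  | nil => simp
  | cons x xs ih => simp [List.foldl_cons, ih]

theorem pv_res_eq (a b : String) :
    (a.toList.foldl (fun res i =>
      b.toList.foldl (fun res j =>
        res ++ [if i = '1' ∧ j = '1' then '1' else '0']) res) [])
    = (a.toList.map (fun c =>
        if c = '1' then b.toList.map (fun c => if c = '1' then '1' else '0')
        else List.replicate b.toList.length '0')).flatten := by
  have h1 : ∀ (i : Char) (acc : List Char),
      b.toList.foldl (fun res j => res ++ [if i = '1' ∧ j = '1' then '1' else '0']) acc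
      = acc ++ b.toList.map (fun j => if i = '1' ∧ j = '1' then '1' else '0') := by
    intro i acc; exact pv_inner_foldl _ _ _
  calc (a.toList.foldl (fun res i =>
          b.toList.foldl (fun res j =>
            res ++ [if i = '1' ∧ j = '1' then '1' else '0']) res) [])
      = (a.toList.foldl (fun res i =>
          res ++ b.toList.map (fun j => if i = '1' ∧ j = '1' then '1' else '0')) []) := by
        exact PySem.List.foldl_congr_mem _ _ _ _ (fun acc i _ => h1 i acc)
    _ = (a.toList.map (fun i =>
          b.toList.map (fun j => if i = '1' ∧ j = '1' then '1' else '0'))).flatten := by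
        simp [pv_outer_foldl a.toList _ []]
    _ = _ := by
        congr 1
        apply List.map_congr_left
        intro i _
        by_cases hi : i = '1'
        · simp [hi]
        · simp [hi, List.map_const']

theorem pv_flag_eq (a b : String) :
    (!(((a.toList.map (fun c =>
        if c = '1' then b.toList.map (fun c => if c = '1' then '1' else '0')
        else List.replicate b.toList.length '0')).flatten).contains '1'))
    = (!(a.toList.contains '1' && b.toList.contains '1')) := by
  congr 1
  simp only [List.contains_eq_mem]
  rw [← Bool.decide_and]
  apply decide_eq_decide.mpr
  simp only [List.mem_flatten, List.mem_map]
  constructor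
  · rintro ⟨row, ⟨c, hc, rfl⟩, hmem⟩
    by_cases hc1 : c = '1'
    · simp only [hc1] at hmem
      obtain ⟨j, hj, hj1⟩ := (List.mem_map).1 hmem
      by_cases hj' : j = '1'
      · exact ⟨hc1 ▸ hc, hj' ▸ hj⟩
      · simp [hj'] at hj1
    · simp only [hc1] at hmem
      have := List.eq_of_mem_replicate hmem
      exact absurd this (by decide)
  · rintro ⟨ha, hb⟩
    refine ⟨b.toList.map (fun c => if c = '1' then '1' else '0'), ⟨'1', ha, by simp⟩, ?_⟩
    exact (List.mem_map).2 ⟨'1', hb, by simp⟩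

-- ===== VERDICT (by name: the statement is the Claim_ definition above) =====
theorem bitWiseAND_spec : Claim_equal_bitWiseAND := by
  intro a b _
  unfold Spec_bitWiseAND bitWiseAND bitWiseAND_alt
  simp only []
  refine Prod.ext ?_ ?_
  · simpa using congrArg String.ofList (pv_res_eq a b)
  · simp [pv_res_eq a b ▸ pv_flag_eq a b]
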